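-- pv_equiv track=rewrite | github.com/astar-security/Lestat | RobbTheRobber.py | isPriv
-- ===== SOURCE A (Python) =====
-- PRIVILEGED_GROUPS = [
--         "admins du domaine",
--         "administrateurs du schéma",
--         "administrateurs de l’entreprise",
--         "administrateurs",
--         "propriétaires créateurs de la stratégie de groupe",
--         "account operators",
--         "administrators",
--         "backup operators",
--         "certificate operators",
--         "domain administrators",
--         "enterprise administrators",
--         "print operators",
--         "replicator",
--         "schema administrators",
--         "server operators"
--         ]
--
-- def isPriv(elem, groups=None):
--     """check clues about an element (user or group) being privileged"""
--     suspected_admin = "adm" in elem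
--     # if elem is a user and groups a list
--     if groups:
--         for i in groups:
--             if i in PRIVILEGED_GROUPS:
--                 return i
--             if "adm" in i:
--                 suspected_admin = True
--         if suspected_admin:
--            return "likely admin"
--         else:
--             return None
--     # if elem is a group and groups is empty
--     else:
--         if elem in PRIVILEGED_GROUPS:
--             return elem
--         elif suspected_admin:
--             return "likely"
--         else:
--             return None
-- ===== SOURCE B (Python) =====
-- PRIVILEGED_GROUPS = [
--         "admins du domaine",
--         "administrateurs du schéma",
--         "administrateurs de l’entreprise",
--         "administrateurs",
--         "propriétaires créateurs de la stratégie de groupe",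
--         "account operators",
--         "administrators",
--         "backup operators",
--         "certificate operators",
--         "domain administrators",
--         "enterprise administrators",
--         "print operators",
--         "replicator",
--         "schema administrators",
--         "server operators"
--         ]
--
-- def isPriv(elem, groups=None):
--     """check clues about an element (user or group) being privileged"""
--     if groups:
--         match = next((g for g in groups if g in PRIVILEGED_GROUPS), None)
--         if match is not None:
--             return match
--         if "adm" in elem or any("adm" in g for g in groups):
--             return "likely admin"
--         return None
--     if elem in PRIVILEGED_GROUPS:
--         return elem
--     if "adm" in elem:
--         return "likely"
--     return None
-- ===== Notes on version B (the rewrite author's own statement) =====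
-- stated objective: idiomatic
-- what changed: The fused loop that both searches for a privileged group and accumulates a suspicion flag is split into two sequential passes: a first-match search (next/find?) returned immediately, then a separate any()-scan for the admin-substring clue only when no match was found.
import Mathlib
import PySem

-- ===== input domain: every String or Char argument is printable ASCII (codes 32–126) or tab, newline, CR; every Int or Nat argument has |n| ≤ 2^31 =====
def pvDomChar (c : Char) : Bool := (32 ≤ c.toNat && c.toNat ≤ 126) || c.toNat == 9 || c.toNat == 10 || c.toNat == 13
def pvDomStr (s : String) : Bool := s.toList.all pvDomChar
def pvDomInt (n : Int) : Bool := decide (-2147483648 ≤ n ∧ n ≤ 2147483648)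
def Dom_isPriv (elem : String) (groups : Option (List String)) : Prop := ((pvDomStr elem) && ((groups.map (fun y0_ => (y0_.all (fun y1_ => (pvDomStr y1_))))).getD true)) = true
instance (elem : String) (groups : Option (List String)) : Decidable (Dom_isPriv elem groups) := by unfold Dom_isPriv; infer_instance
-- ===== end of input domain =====

-- B replaces A's fused search-and-flag loop by two sequential passes (first-match search, then an any-scan); objective: more idiomatic decomposition, same cost.

def privilegedGroups : List String := [
  "admins du domaine",
  "administrateurs du schéma",
  "administrateurs de l’entreprise",
  "administrateurs",
  "propriétaires créateurs de la stratégie de groupe",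
  "account operators",
  "administrators",
  "backup operators",
  "certificate operators",
  "domain administrators",
  "enterprise administrators",
  "print operators",
  "replicator",
  "schema administrators",
  "server operators"]

-- ===== PORT A =====
-- A's for-loop with its mutable suspected_admin flag, as structural recursion on the group list
def aLoop (suspected : Bool) : List String → Option String
  | [] => if suspected then some "likely admin" else none
  | i :: rest =>
      if privilegedGroups.contains i then some i
      else aLoop (suspected || PySem.Str.isIn "adm" i) rest

def isPriv (elem : String) (groups : Option (List String)) : Option String :=
  let suspected := PySem.Str.isIn "adm" elem
  match groups with
  | some (g :: gs) => aLoop suspected (g :: gs)   -- 'if groups:' — truthy iff a non-empty list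
  | _ =>
      if privilegedGroups.contains elem then some elem
      else if suspected then some "likely" else none

-- ===== PORT B =====
def privilegedGroupsB : List String := [
  "admins du domaine",
  "administrateurs du schéma",
  "administrateurs de l’entreprise",
  "administrateurs",
  "propriétaires créateurs de la stratégie de groupe",
  "account operators",
  "administrators",
  "backup operators",
  "certificate operators",
  "domain administrators",
  "enterprise administrators",
  "print operators",
  "replicator",
  "schema administrators",
  "server operators"]

def isPriv_alt (elem : String) (groups : Option (List String)) : Option String :=
  let gs := groups.getD []
  if !gs.isEmpty then   -- 'if groups:'
    match gs.find? (fun x => privilegedGroupsB.contains x) with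
    | some m => some m
    | none =>
        if PySem.Str.isIn "adm" elem || gs.any (fun x => PySem.Str.isIn "adm" x)
        then some "likely admin" else none
  else
    if privilegedGroupsB.contains elem then some elem
    else if PySem.Str.isIn "adm" elem then some "likely" else none

-- ===== PRECONDITION & SPEC =====
def Spec_isPriv (elem : String) (groups : Option (List String)) (out : Option String) : Prop := out = isPriv_alt elem groups
instance (elem : String) (groups : Option (List String)) (out : Option String) : Decidable (Spec_isPriv elem groups out) := by unfold Spec_isPriv; infer_instance

-- ===== CLAIM (what is proved, stated in full; the proofs are below) =====
def Claim_equal_isPriv : Prop := ∀ (elem : String) (groups : Option (List String)), Dom_isPriv elem groups → Spec_isPriv elem groups (isPriv elem groups)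

-- ===== LEMMAS AND PROOFS =====
theorem privilegedGroupsB_eq : privilegedGroupsB = privilegedGroups := rfl

theorem aLoop_eq (xs : List String) : ∀ (suspected : Bool),
    aLoop suspected xs =
      match xs.find? (fun x => privilegedGroups.contains x) with
      | some m => some m
      | none =>
          if suspected || xs.any (fun x => PySem.Str.isIn "adm" x)
          then some "likely admin" else none := by
  induction xs with
  | nil => intro s; simp [aLoop]
  | cons g gs ih =>
      intro s
      by_cases h : g ∈ privilegedGroups <;>
        simp [aLoop, List.find?_cons, h, ih, Bool.or_assoc]

-- ===== VERDICT (by name: the statement is the Claim_ definition above) =====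
theorem isPriv_spec : Claim_equal_isPriv := by
  intro elem groups _
  unfold Spec_isPriv isPriv isPriv_alt
  match groups with
  | none => rfl
  | some [] => rfl
  | some (g :: gs) =>
      simpa [privilegedGroupsB_eq] using aLoop_eq (g :: gs) (PySem.Str.isIn "adm" elem)
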